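-- pv_equiv track=rewrite | github.com/nustarnuclear/orient_linux | tragopan/functions.py | generate_assembly_position
-- ===== SOURCE A (Python) =====
-- def generate_assembly_position(number=17):
--     positions=[]
--     for i in range(1,number*number+1):
--         md=i%number
--         if md ==0:
--             column=number
--         else:
--             column=md
--         row=(i-column)/number+1
--         positions.append([round(row),column])
--     return positions
-- ===== SOURCE B (Python) =====
-- def generate_assembly_position(number=17):
--     return [[row, column]
--             for row in range(1, number + 1)
--             for column in range(1, number + 1)]
-- ===== Notes on version B (the rewrite author's own statement) =====
-- stated objective: simpler
-- what changed: Replaces the single loop over i in 1..n*n with modulo/float-division/round index recovery by a plain nested row/column comprehension.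
-- intended difference: For negative number, A returns number*number rows with negative row/column indices while B returns the empty list, the intended result for a negative grid size. — e.g. on generate_assembly_position(-1): A returns [[-1, -1]], B returns []
import Mathlib
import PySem

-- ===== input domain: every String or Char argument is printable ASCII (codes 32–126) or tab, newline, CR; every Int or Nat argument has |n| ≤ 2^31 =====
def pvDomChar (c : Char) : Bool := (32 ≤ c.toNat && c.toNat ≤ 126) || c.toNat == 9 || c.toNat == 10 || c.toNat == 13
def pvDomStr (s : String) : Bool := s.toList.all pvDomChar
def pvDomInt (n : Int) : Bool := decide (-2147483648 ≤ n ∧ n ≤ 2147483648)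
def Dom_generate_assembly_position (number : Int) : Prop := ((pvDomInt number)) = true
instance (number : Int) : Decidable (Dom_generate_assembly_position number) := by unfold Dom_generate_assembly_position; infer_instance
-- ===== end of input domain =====

-- B replaces A's single 1..n² loop with modulo/float-division/round index recovery by a plain
-- nested row/column comprehension (simpler); for number < 0, B returns [] where A emits n² bogus rows (D_).


-- ===== PORT A =====
-- row=(i-column)/number+1 is Python float division followed by round; it is exact here because
-- number ∣ (i-column) (column ≡ i (mod number)) and |row| < 2^31, so the float error is < 1/2 and
-- round recovers exactly the integer quotient; we port it as exact integer division.
-- the 'positions.append(...)' loop is ported with the standard cons-accumulator + final reverse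
-- (Python's O(1) append; a Lean '++ [x]' per step would be quadratic and time out on evaluation).
def generate_assembly_position (number : Int) : List (List Int) :=
  ((PySem.List.pyRange 1 (number * number + 1) 1).foldl
    (fun positions i =>
      let md := PySem.Int.mod i number
      let column := if md = 0 then number else md
      let row := (i - column) / number + 1
      [row, column] :: positions) []).reverse

-- ===== PORT B =====
def generate_assembly_position_alt (number : Int) : List (List Int) :=
  (PySem.List.pyRange 1 (number + 1) 1).flatMap
    (fun row => (PySem.List.pyRange 1 (number + 1) 1).map (fun column => [row, column]))

-- ===== PRECONDITION & SPEC =====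
-- For negative number, A returns number*number rows with negative row/column indices
-- while B returns the empty list, the intended result for a negative grid size.
def D_generate_assembly_position (number : Int) : Prop := number < 0
instance (number : Int) : Decidable (D_generate_assembly_position number) := by unfold D_generate_assembly_position; infer_instance
def Spec_generate_assembly_position (number : Int) (out : List (List Int)) : Prop := ¬ D_generate_assembly_position number → out = generate_assembly_position_alt number
instance (number : Int) (out : List (List Int)) : Decidable (Spec_generate_assembly_position number out) := by unfold Spec_generate_assembly_position; infer_instance
def pvDiffWitness_generate_assembly_position : Int := (-1)
def pvDiffWitnessOut_generate_assembly_position : (List (List Int)) × (List (List Int)) := ([[-1, -1]], [])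

-- ===== CLAIM (what is proved, stated in full; the proofs are below) =====
def Claim_unchanged_generate_assembly_position : Prop := ∀ (number : Int), Dom_generate_assembly_position number → Spec_generate_assembly_position number (generate_assembly_position number)
def Claim_changed_generate_assembly_position : Prop := Dom_generate_assembly_position (pvDiffWitness_generate_assembly_position) ∧ D_generate_assembly_position (pvDiffWitness_generate_assembly_position) ∧ generate_assembly_position (pvDiffWitness_generate_assembly_position) = pvDiffWitnessOut_generate_assembly_position.1 ∧ generate_assembly_position_alt (pvDiffWitness_generate_assembly_position) = pvDiffWitnessOut_generate_assembly_position.2 ∧ pvDiffWitnessOut_generate_assembly_position.1 ≠ pvDiffWitnessOut_generate_assembly_position.2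
def Claim_exact_generate_assembly_position : Prop := ∀ (number : Int), Dom_generate_assembly_position number → D_generate_assembly_position number → generate_assembly_position number ≠ generate_assembly_position_alt number

-- ===== LEMMAS AND PROOFS =====

-- A's append-loop (cons-accumulator form) is a reversed map over the range.
theorem foldl_cons_map {α β : Type} (f : α → β) :
    ∀ (l : List α) (init : List β),
      l.foldl (fun acc i => f i :: acc) init = (l.map f).reverse ++ init := by
  intro l
  induction l with
  | nil => simp
  | cons x xs ih => intro init; simp [List.foldl_cons, ih]

def genBody (number : Int) (i : Int) : List Int :=
  let md := PySem.Int.mod i number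
  let column := if md = 0 then number else md
  [(i - column) / number + 1, column]

theorem genA_eq_map (number : Int) :
    generate_assembly_position number =
      (PySem.List.pyRange 1 (number * number + 1) 1).map (genBody number) := by
  unfold generate_assembly_position genBody
  rw [foldl_cons_map]
  simp

-- the per-element value of A's body on row block m, offset k (0 ≤ k < n, n > 0)
theorem body_eq (n : Int) (m k : Nat) (hn : 0 < n) (hk : (k : Int) < n) :
    genBody n ((m : Int) * n + 1 + k) = [(m : Int) + 1, 1 + k] := by
  unfold genBody
  have hmod : PySem.Int.mod ((m : Int) * n + 1 + k) n = (1 + (k : Int)) % n := by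
    rw [PySem.Int.mod_eq_emod_of_pos hn,
      show (m : Int) * n + 1 + k = (1 + (k : Int)) + n * m by ring,
      Int.add_mul_emod_self_left]
  simp only [hmod]
  by_cases hlast : (k : Int) + 1 = n
  · have h0 : (1 + (k : Int)) % n = 0 := by
      rw [show (1 + (k : Int)) = n by omega]
      simp
    rw [if_pos h0]
    have h2 : (m : Int) * n + 1 + k - n = m * n := by omega
    rw [h2, Int.mul_ediv_cancel _ (by omega : n ≠ 0),
      show (n : Int) = 1 + k by omega]
  · have hval : (1 + (k : Int)) % n = 1 + k := Int.emod_eq_of_lt (by omega) (by omega)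
    have hne : (1 + (k : Int)) % n ≠ 0 := by rw [hval]; omega
    rw [if_neg hne, hval]
    have h2 : (m : Int) * n + 1 + k - (1 + k) = m * n := by omega
    rw [h2, Int.mul_ediv_cancel _ (by omega : n ≠ 0)]

-- row-block decomposition: map over 1..m*n equals flatMap of m rows of n columns
theorem blocks (n : Int) (hn : 0 < n) :
    ∀ (m : Nat),
      (PySem.List.pyRange 1 ((m : Int) * n + 1) 1).map (genBody n) =
        (PySem.List.pyRange 1 ((m : Int) + 1) 1).flatMap
          (fun row => (PySem.List.pyRange 1 (n + 1) 1).map (fun column => [row, column])) := by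
  intro m
  induction m with
  | zero => simp [PySem.List.pyRange_one_eq_nil]
  | succ m ih =>
    push_cast
    have hnn : (0 : Int) ≤ (m : Int) * n := mul_nonneg (Int.natCast_nonneg m) (le_of_lt hn)
    have hsplit : PySem.List.pyRange 1 (((m : Int) + 1) * n + 1) 1 =
        PySem.List.pyRange 1 ((m : Int) * n + 1) 1 ++
        PySem.List.pyRange ((m : Int) * n + 1) (((m : Int) + 1) * n + 1) 1 :=
      PySem.List.pyRange_one_append 1 ((m : Int) * n + 1) (((m : Int) + 1) * n + 1)
        (by omega) (by nlinarith)

    rw [hsplit, List.map_append, ih]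
    have hsucc : PySem.List.pyRange 1 ((m : Int) + 1 + 1) 1 =
        PySem.List.pyRange 1 ((m : Int) + 1) 1 ++ [(m : Int) + 1] :=
      PySem.List.pyRange_one_succ_right (by omega)
    rw [hsucc, List.flatMap_append, List.flatMap_singleton]
    congr 1
    -- last block: the m-th row
    rw [PySem.List.pyRange_one, PySem.List.pyRange_one, List.map_map, List.map_map]
    have hlen1 : ((((m : Int) + 1) * n + 1) - ((m : Int) * n + 1)).toNat = n.toNat := by
      have : (((m : Int) + 1) * n + 1) - ((m : Int) * n + 1) = n := by ring
      rw [this]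
    have hlen2 : ((n + 1 : Int) - 1).toNat = n.toNat := by omega
    rw [hlen1, hlen2]
    apply List.map_congr_left
    intro k hk
    simp only [List.mem_range] at hk
    have hk' : (k : Int) < n := by omega
    show genBody n ((m : Int) * n + 1 + k) = [(m : Int) + 1, 1 + (k : Int)]
    exact body_eq n m k hn hk'

theorem genA_ne_nil_of_neg (number : Int) (h : number < 0) :
    generate_assembly_position number ≠ [] := by
  rw [genA_eq_map]
  intro hcontra
  rw [List.map_eq_nil_iff] at hcontra
  have h1 : (1 : Int) < number * number + 1 := by nlinarith
  rw [PySem.List.pyRange_one_cons h1] at hcontra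
  exact List.cons_ne_nil _ _ hcontra

theorem genAlt_nil_of_neg (number : Int) (h : number < 0) :
    generate_assembly_position_alt number = [] := by
  unfold generate_assembly_position_alt
  rw [PySem.List.pyRange_one_eq_nil (by omega)]
  rfl

-- ===== VERDICT (by name: the statement is the Claim_ definition above) =====
theorem generate_assembly_position_spec : Claim_unchanged_generate_assembly_position := by
  intro number _
  unfold Spec_generate_assembly_position D_generate_assembly_position
  intro hnD
  rw [Int.not_lt] at hnD
  rcases lt_or_eq_of_le hnD with hpos | heq
  · -- number > 0
    have hm : ((number.toNat : Int)) = number := Int.toNat_of_nonneg (le_of_lt hpos)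
    have hb := blocks number hpos number.toNat
    rw [hm] at hb
    rw [genA_eq_map, hb]
    unfold generate_assembly_position_alt
    rfl
  · -- number = 0
    rw [← heq]
    unfold generate_assembly_position generate_assembly_position_alt
    rfl

theorem generate_assembly_position_changed : Claim_changed_generate_assembly_position := by
  unfold Claim_changed_generate_assembly_position; decide

theorem generate_assembly_position_tight : Claim_exact_generate_assembly_position := by
  intro number _ hD
  unfold D_generate_assembly_position at hD
  rw [genAlt_nil_of_neg number hD]
  exact genA_ne_nil_of_neg number hD
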